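-- pv_equiv track=rewrite | github.com/Paarthi-Matrix/core-python | test.py | get_words_with_more_than_one_occurrence
-- ===== SOURCE A (Python) =====
-- def get_words_with_more_than_one_occurrence(word_list):
--     word_dict = {}
--     answer = []
--     for word in word_list:
--         if word in word_dict:
--             answer.append(word)
--             word_dict[word] = word_dict[word] + 1
--         else:
--             word_dict[word] = 1
--     return answer
-- ===== SOURCE B (Python) =====
-- def get_words_with_more_than_one_occurrence(word_list):
--     lst = list(word_list)
--     first_index = {}
--     for i, w in enumerate(lst):
--         if w not in first_index:
--             first_index[w] = i
--     return [w for i, w in enumerate(lst) if first_index[w] < i]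
-- ===== Notes on version B (the rewrite author's own statement) =====
-- stated objective: alternative
-- what changed: Instead of one stateful pass appending while counting in a dict, B builds a first-occurrence-index map in one pass and then collects, via a second enumerate pass, every word standing strictly after its first occurrence.
import Mathlib
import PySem

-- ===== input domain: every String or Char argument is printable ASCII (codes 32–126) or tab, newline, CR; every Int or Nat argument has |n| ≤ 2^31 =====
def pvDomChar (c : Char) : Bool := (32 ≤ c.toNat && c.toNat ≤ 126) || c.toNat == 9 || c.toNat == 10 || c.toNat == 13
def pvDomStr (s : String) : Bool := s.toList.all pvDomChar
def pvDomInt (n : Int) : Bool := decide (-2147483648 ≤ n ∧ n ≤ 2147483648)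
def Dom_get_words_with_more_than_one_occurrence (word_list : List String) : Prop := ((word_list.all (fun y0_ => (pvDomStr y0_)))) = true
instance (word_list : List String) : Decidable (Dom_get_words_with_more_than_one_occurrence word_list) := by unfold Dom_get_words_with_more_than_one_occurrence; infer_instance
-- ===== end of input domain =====

-- B replaces A's single stateful counting pass by a first-occurrence-index map plus an
-- enumerate filter (objective: alternative decomposition, same asymptotic cost).

-- ===== PORT A =====
-- the for-loop of A: state = (word_dict, answer)
def pvALoop : List String → PySem.Dict String Int → List String → List String
  | [], _, ans => ans
  | w :: l, d, ans =>
    if d.contains w then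
      -- word_dict[word] = word_dict[word] + 1  (w is a key here, so getD's default is never used)
      pvALoop l (d.insert w (d.getD w 0 + 1)) (ans ++ [w])
    else
      pvALoop l (d.insert w 1) ans

def get_words_with_more_than_one_occurrence (word_list : List String) : List String :=
  pvALoop word_list PySem.Dict.empty []

-- ===== PORT B =====
def get_words_with_more_than_one_occurrence_alt (word_list : List String) : List String :=
  let lst := word_list
  -- for i, w in enumerate(lst): if w not in first_index: first_index[w] = i
  let first_index :=
    (PySem.List.enumerate lst 0).foldl
      (fun d p => if d.contains p.2 then d else d.insert p.2 p.1)
      (PySem.Dict.empty : PySem.Dict String Int)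
  -- [w for i, w in enumerate(lst) if first_index[w] < i]   (every w is a key, so getD's default is never used)
  ((PySem.List.enumerate lst 0).filter
      (fun p => decide (first_index.getD p.2 0 < p.1))).map (·.2)

-- ===== PRECONDITION & SPEC =====
def Spec_get_words_with_more_than_one_occurrence (word_list : List String) (out : List String) : Prop := out = get_words_with_more_than_one_occurrence_alt word_list
instance (word_list : List String) (out : List String) : Decidable (Spec_get_words_with_more_than_one_occurrence word_list out) := by unfold Spec_get_words_with_more_than_one_occurrence; infer_instance

-- ===== CLAIM (what is proved, stated in full; the proofs are below) =====
def Claim_equal_get_words_with_more_than_one_occurrence : Prop := ∀ (word_list : List String), Dom_get_words_with_more_than_one_occurrence word_list → Spec_get_words_with_more_than_one_occurrence word_list (get_words_with_more_than_one_occurrence word_list)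

-- ===== LEMMAS AND PROOFS =====

-- reference recursion: the duplicates of l given the already-seen prefix pre
def pvDups (pre : List String) : List String → List String
  | [] => []
  | w :: l => if w ∈ pre then w :: pvDups (pre ++ [w]) l else pvDups (pre ++ [w]) l

-- A's loop computes pvDups of the "seen" set recorded in the dict keys
theorem pvALoop_eq (l : List String) :
    ∀ (d : PySem.Dict String Int) (ans pre : List String),
    (∀ x, d.contains x = true ↔ x ∈ pre) →
    pvALoop l d ans = ans ++ pvDups pre l := by
  induction l with
  | nil => intro d ans pre _; simp [pvALoop, pvDups]
  | cons w l ih =>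
    intro d ans pre h
    have hins : ∀ (v : Int) x, (d.insert w v).contains x = true ↔ x ∈ pre ++ [w] := by
      intro v x
      rw [PySem.Dict.contains_insert]
      simp [h x, or_comm, eq_comm (a := x)]
    by_cases hc : d.contains w = true
    · have hwpre : w ∈ pre := (h w).mp hc
      simp only [pvALoop, if_pos hc, pvDups, if_pos hwpre]
      rw [ih _ _ (pre ++ [w]) (hins _), List.append_assoc]
      rfl
    · have hwpre : w ∉ pre := fun hm => hc ((h w).mpr hm)
      simp only [pvALoop, if_neg hc, pvDups, if_neg hwpre]
      exact ih _ _ (pre ++ [w]) (hins _)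

-- the first-index dict's loop body
def pvFiStep (d : PySem.Dict String Int) (p : Int × String) : PySem.Dict String Int :=
  if d.contains p.2 then d else d.insert p.2 p.1

theorem pvFiStep_pos (d : PySem.Dict String Int) (p : Int × String)
    (h : d.contains p.2 = true) : pvFiStep d p = d := by simp [pvFiStep, h]

theorem pvFiStep_neg (d : PySem.Dict String Int) (p : Int × String)
    (h : d.contains p.2 = false) : pvFiStep d p = d.insert p.2 p.1 := by simp [pvFiStep, h]

-- lookups of words that are already keys never change
theorem pvFi_getD_of_contains (xs : List String) :
    ∀ (s : Int) (d : PySem.Dict String Int) (w : String), d.contains w = true →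
    ((PySem.List.enumerate xs s).foldl pvFiStep d).getD w 0 = d.getD w 0 ∧
    ((PySem.List.enumerate xs s).foldl pvFiStep d).contains w = true := by
  induction xs with
  | nil => intro s d w h; simp [PySem.List.enumerate_nil, h]
  | cons x xs ih =>
    intro s d w h
    rw [PySem.List.enumerate_cons]
    simp only [List.foldl_cons]
    cases hx : d.contains x with
    | true => rw [pvFiStep_pos _ _ hx]; exact ih (s + 1) d w h
    | false =>
      rw [pvFiStep_neg _ _ hx]
      have hne : w ≠ x := fun he => by rw [he] at h; rw [h] at hx; exact Bool.true_eq_false.mp hx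
      have h' : (d.insert x s).contains w = true := by
        rw [PySem.Dict.contains_insert]; simp [h]
      have hres := ih (s + 1) (d.insert x s) w h'
      refine ⟨?_, hres.2⟩
      rw [hres.1, PySem.Dict.getD_insert_of_ne]
      exact hne

-- building from a dict without w: the stored value is s + (first index of w in xs)
theorem pvFi_getD_fresh (xs : List String) :
    ∀ (s : Int) (d : PySem.Dict String Int) (w : String), w ∈ xs → d.contains w = false →
    ((PySem.List.enumerate xs s).foldl pvFiStep d).getD w 0 = s + (xs.idxOf w : Int) := by
  induction xs with
  | nil => intro _ _ _ h; simp at h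
  | cons x xs ih =>
    intro s d w hmem h
    rw [PySem.List.enumerate_cons]
    simp only [List.foldl_cons]
    by_cases hwx : w = x
    · subst hwx
      rw [pvFiStep_neg _ _ (by simpa using h)]
      have hc : (d.insert w s).contains w = true := PySem.Dict.contains_insert_self d w s
      rw [(pvFi_getD_of_contains xs (s + 1) (d.insert w s) w hc).1,
        PySem.Dict.getD_insert_self, List.idxOf_cons_self]
      simp
    · have hmem' : w ∈ xs := by
        rcases List.mem_cons.mp hmem with h' | h'
        · exact absurd h' hwx
        · exact h'
      have hidx : ((x :: xs).idxOf w : Int) = (xs.idxOf w : Int) + 1 := by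
        rw [List.idxOf_cons_ne _ (fun he => hwx he.symm)]; push_cast; ring
      cases hx : d.contains x with
      | true =>
        rw [pvFiStep_pos _ _ hx, ih (s + 1) d w hmem' h, hidx]; ring
      | false =>
        rw [pvFiStep_neg _ _ hx]
        have h' : (d.insert x s).contains w = false := by
          rw [PySem.Dict.contains_insert]
          simp [h, hwx]
        rw [ih (s + 1) (d.insert x s) w hmem' h', hidx]; ring

-- pvDups is the enumerate-filter by "first occurrence in the full list is earlier"
theorem pvDups_eq_filter (l : List String) :
    ∀ (pre : List String),
    pvDups pre l =
      ((PySem.List.enumerate l (pre.length : Int)).filter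
        (fun p => decide (((pre ++ l).idxOf p.2 : Int) < p.1))).map (·.2) := by
  induction l with
  | nil => intro pre; simp [pvDups, PySem.List.enumerate_nil]
  | cons w l ih =>
    intro pre
    rw [PySem.List.enumerate_cons]
    have ih' := ih (pre ++ [w])
    rw [show ((pre ++ [w]).length : Int) = (pre.length : Int) + 1 by simp,
      show (pre ++ [w]) ++ l = pre ++ w :: l from by simp] at ih'
    by_cases hw : w ∈ pre
    · have hcond : ((pre ++ w :: l).idxOf w : Int) < (pre.length : Int) := by
        rw [List.idxOf_append_of_mem hw]
        exact_mod_cast List.idxOf_lt_length_of_mem hw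
      simp [pvDups, hw, hcond, ih']
    · have hcond : ¬ ((pre ++ w :: l).idxOf w : Int) < (pre.length : Int) := by
        rw [List.idxOf_append_of_notMem hw, List.idxOf_cons_self]
        simp
      simp [pvDups, hw, hcond, ih']

-- ===== VERDICT (by name: the statement is the Claim_ definition above) =====
theorem get_words_with_more_than_one_occurrence_spec : Claim_equal_get_words_with_more_than_one_occurrence := by
  intro xs _
  unfold Spec_get_words_with_more_than_one_occurrence get_words_with_more_than_one_occurrence
    get_words_with_more_than_one_occurrence_alt
  rw [pvALoop_eq xs PySem.Dict.empty [] [] (by simp [PySem.Dict.contains_empty]),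
    List.nil_append, pvDups_eq_filter xs []]
  simp only [List.nil_append, List.length_nil, Nat.cast_zero]
  congr 1
  apply List.filter_congr
  intro p hp
  rcases (PySem.List.mem_enumerate_iff _ _ _).mp hp with ⟨k, hk, rfl⟩
  have hmem : xs[k] ∈ xs := List.getElem_mem hk
  have := pvFi_getD_fresh xs 0 PySem.Dict.empty xs[k] hmem (PySem.Dict.contains_empty _)
  show decide _ = decide _
  rw [show (fun d p => if d.contains p.2 then d else d.insert p.2 p.1) = pvFiStep from rfl, this]
  simp
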